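-- pv_equiv track=rewrite | github.com/dislovelhl/acgs2 | acgs2-core/enhanced_agent_bus/deliberation_layer/llm_assistant.py | _summarize_votes
-- ===== SOURCE A (Python) =====
-- from typing import Dict, Any, List, Optional
--
-- def _summarize_votes(votes: List[Dict[str, Any]]) -> str:
--     """Summarize agent votes for LLM context."""
--     if not votes:
--         return "No votes recorded"
--
--     summary_parts = []
--     approve_count = sum(1 for v in votes if v.get('vote') == 'approve')
--     reject_count = sum(1 for v in votes if v.get('vote') == 'reject')
--     abstain_count = sum(1 for v in votes if v.get('vote') == 'abstain')
--
--     summary_parts.append(f"Total votes: {len(votes)}")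
--     summary_parts.append(f"Approve: {approve_count}, Reject: {reject_count}, Abstain: {abstain_count}")
--
--     # Add sample reasoning
--     if votes:
--         sample_vote = votes[0]
--         reasoning = sample_vote.get('reasoning', 'No reasoning provided')
--         if len(reasoning) > 100:
--             reasoning = reasoning[:100] + "..."
--         summary_parts.append(f"Sample reasoning: {reasoning}")
--
--     return "; ".join(summary_parts)
-- ===== SOURCE B (Python) =====
-- def _summarize_votes(votes):
--     """Summarize agent votes for LLM context."""
--     if not votes:
--         return "No votes recorded"
--
--     approve = reject = abstain = 0
--     for v in votes:
--         val = v.get('vote')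
--         if val == 'approve':
--             approve += 1
--         elif val == 'reject':
--             reject += 1
--         elif val == 'abstain':
--             abstain += 1
--
--     reasoning = votes[0].get('reasoning', 'No reasoning provided')
--     if len(reasoning) > 100:
--         reasoning = reasoning[:100] + "..."
--
--     return (f"Total votes: {len(votes)}; Approve: {approve}, Reject: {reject}, "
--             f"Abstain: {abstain}; Sample reasoning: {reasoning}")
-- ===== Notes on version B (the rewrite author's own statement) =====
-- stated objective: simpler
-- what changed: Replaces the three separate sum() scans with one loop that tallies all three counters, and builds the result as a single f-string instead of a parts list joined at the end.
import Mathlib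
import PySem

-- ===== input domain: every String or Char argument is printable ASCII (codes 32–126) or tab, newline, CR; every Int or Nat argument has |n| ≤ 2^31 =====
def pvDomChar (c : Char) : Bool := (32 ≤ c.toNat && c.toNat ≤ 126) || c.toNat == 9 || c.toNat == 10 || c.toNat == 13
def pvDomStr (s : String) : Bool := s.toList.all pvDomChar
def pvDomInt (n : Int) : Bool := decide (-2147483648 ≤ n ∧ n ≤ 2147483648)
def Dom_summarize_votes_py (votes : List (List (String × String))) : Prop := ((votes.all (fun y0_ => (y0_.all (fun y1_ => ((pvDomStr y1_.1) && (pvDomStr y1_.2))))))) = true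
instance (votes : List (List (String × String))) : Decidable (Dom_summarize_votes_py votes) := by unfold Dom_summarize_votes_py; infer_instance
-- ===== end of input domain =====

-- B tallies all three counters in ONE loop over votes (A scans four times) and emits the
-- summary as a single formatted string instead of joining a parts list; return values are proved equal.


-- ===== PORT A =====
def summarize_votes_py (votes : List (List (String × String))) : String :=
  if votes = [] then "No votes recorded"
  else
    let approve_count : Int := votes.foldl (fun acc v => if PySem.Dict.get? (PySem.Dict.mk v) "vote" = some "approve" then acc + 1 else acc) 0
    let reject_count : Int := votes.foldl (fun acc v => if PySem.Dict.get? (PySem.Dict.mk v) "vote" = some "reject" then acc + 1 else acc) 0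
    let abstain_count : Int := votes.foldl (fun acc v => if PySem.Dict.get? (PySem.Dict.mk v) "vote" = some "abstain" then acc + 1 else acc) 0
    let part1 := PySem.Str.join "" ["Total votes: ", PySem.Int.toStr (PySem.List.len votes)]
    let part2 := PySem.Str.join "" ["Approve: ", PySem.Int.toStr approve_count, ", Reject: ", PySem.Int.toStr reject_count, ", Abstain: ", PySem.Int.toStr abstain_count]
    let sample_vote := PySem.List.pyGetD votes 0 []   -- votes[0]; in range since votes ≠ []
    let reasoning := PySem.Dict.getD (PySem.Dict.mk sample_vote) "reasoning" "No reasoning provided"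
    let reasoning := if PySem.Str.len reasoning > 100 then PySem.Str.join "" [PySem.Str.slice reasoning none (some 100), "..."] else reasoning
    let part3 := PySem.Str.join "" ["Sample reasoning: ", reasoning]
    PySem.Str.join "; " [part1, part2, part3]

-- ===== PORT B =====
def summarize_votes_py_alt (votes : List (List (String × String))) : String :=
  if votes = [] then "No votes recorded"
  else
    let t : Int × Int × Int := votes.foldl (fun acc v =>
      let val := PySem.Dict.get? (PySem.Dict.mk v) "vote"
      if val = some "approve" then (acc.1 + 1, acc.2.1, acc.2.2)
      else if val = some "reject" then (acc.1, acc.2.1 + 1, acc.2.2)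
      else if val = some "abstain" then (acc.1, acc.2.1, acc.2.2 + 1)
      else acc) (0, 0, 0)
    let reasoning := PySem.Dict.getD (PySem.Dict.mk (PySem.List.pyGetD votes 0 [])) "reasoning" "No reasoning provided"
    let reasoning := if PySem.Str.len reasoning > 100 then PySem.Str.join "" [PySem.Str.slice reasoning none (some 100), "..."] else reasoning
    PySem.Str.join "" ["Total votes: ", PySem.Int.toStr (PySem.List.len votes),
      "; Approve: ", PySem.Int.toStr t.1, ", Reject: ", PySem.Int.toStr t.2.1,
      ", Abstain: ", PySem.Int.toStr t.2.2, "; Sample reasoning: ", reasoning]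

-- ===== PRECONDITION & SPEC =====
def Spec_summarize_votes_py (votes : List (List (String × String))) (out : String) : Prop := out = summarize_votes_py_alt votes
instance (votes : List (List (String × String))) (out : String) : Decidable (Spec_summarize_votes_py votes out) := by unfold Spec_summarize_votes_py; infer_instance

-- ===== CLAIM (what is proved, stated in full; the proofs are below) =====
def Claim_equal_summarize_votes_py : Prop := ∀ (votes : List (List (String × String))), Dom_summarize_votes_py votes → Spec_summarize_votes_py votes (summarize_votes_py votes)

-- ===== LEMMAS AND PROOFS =====

-- One pass with a triple accumulator computes the same three counts as three separate passes.
theorem tri_fold_eq (votes : List (List (String × String))) (a r b : Int) :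
    votes.foldl (fun acc v =>
      let val := PySem.Dict.get? (PySem.Dict.mk v) "vote"
      if val = some "approve" then (acc.1 + 1, acc.2.1, acc.2.2)
      else if val = some "reject" then (acc.1, acc.2.1 + 1, acc.2.2)
      else if val = some "abstain" then (acc.1, acc.2.1, acc.2.2 + 1)
      else acc) ((a, r, b) : Int × Int × Int)
    = (votes.foldl (fun acc v => if PySem.Dict.get? (PySem.Dict.mk v) "vote" = some "approve" then acc + 1 else acc) a,
       votes.foldl (fun acc v => if PySem.Dict.get? (PySem.Dict.mk v) "vote" = some "reject" then acc + 1 else acc) r,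
       votes.foldl (fun acc v => if PySem.Dict.get? (PySem.Dict.mk v) "vote" = some "abstain" then acc + 1 else acc) b) := by
  induction votes generalizing a r b with
  | nil => simp
  | cons v tl ih =>
    simp only [List.foldl_cons]
    split_ifs with h1 h2 h3 <;> simp_all [ih]

-- A's "; ".join of the three parts equals B's single formatted string (as char lists).
theorem join_shape (n ap rj ab rs : String) :
    PySem.Str.join "; " [PySem.Str.join "" ["Total votes: ", n],
      PySem.Str.join "" ["Approve: ", ap, ", Reject: ", rj, ", Abstain: ", ab],
      PySem.Str.join "" ["Sample reasoning: ", rs]]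
    = PySem.Str.join "" ["Total votes: ", n, "; Approve: ", ap, ", Reject: ", rj,
        ", Abstain: ", ab, "; Sample reasoning: ", rs] := by
  apply String.ext
  simp [PySem.Str.toList_join, PySem.Chars.join, List.intercalate, List.intersperse,
    List.flatten, List.append_assoc]

-- ===== VERDICT (by name: the statement is the Claim_ definition above) =====
theorem summarize_votes_py_spec : Claim_equal_summarize_votes_py := by
  intro votes _
  unfold Spec_summarize_votes_py summarize_votes_py summarize_votes_py_alt
  split_ifs with h
  · rfl
  · simp only [tri_fold_eq]
    exact join_shape _ _ _ _ _
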